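/- GENERATED by farm/mkstatement.py from design/units.tsv (unit `start_decoder.C8f`) and the assertions of Vorbis/Spec/StartDecoderC8.lean — do not edit.
   THE STATEMENT of the proof unit `start_decoder.C8f`: segment C8f of `start_decoder` (20 instructions; entries 0x114b24;
   exits 0x114724; ranges 0x114b24-0x114b7a)
   takes each of its entry assertions to one of its exit assertions (`Vorbis.Spec.StartDecoder.SegC8f`), given the contracts of its callees.
   What the names mean: Vorbis/Spec/Basic.lean (the shared hypotheses), Vorbis/Spec/StartDecoderC8.lean (the assertions). The theorem to prove:
   `theorem start_decoder_C8f_ok : Vorbis.Spec.start_decoder_C8f.Statement`. -/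
import Vorbis.Spec.Alloc
import Vorbis.Spec.StartDecoderC8
namespace Vorbis.Spec.start_decoder_C8f
open X86 X86.User Asan

/-- The statement of unit `start_decoder.C8f`. -/
def Statement : Prop :=
  ∀ (Lay : Layout) (_hLay : Lay.hi = 0x1000000) (μ : Microarch) (_hμ : UserX.MicroOK μ) (u₀ : State)
    (_hcode : HasCodeNat Lay u₀ Vorbis.L.start_decoder.entry Vorbis.Code.code_start_decoder.nat Vorbis.L.start_decoder.size)
    (_h_asan_load4_noabort : Asan.SmallCheck Lay μ Vorbis.WayInv (Vorbis.CodeOK u₀) [.rax, .rcx, .rdx] 4 Vorbis.L.__asan_load4_noabort.entry)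
    (_h_asan_store8_noabort : Asan.SmallCheck Lay μ Vorbis.WayInv (Vorbis.CodeOK u₀) [.rax, .rcx, .rdx] 8 Vorbis.L.__asan_store8_noabort.entry)
    (_h_asan_load8_noabort : Asan.SmallCheck Lay μ Vorbis.WayInv (Vorbis.CodeOK u₀) [.rax, .rcx, .rdx] 8 Vorbis.L.__asan_load8_noabort.entry)
    (_h_setup_temp_free : ∀ (others : List Obj) (frames : List (Nat × FrameLayout)) (A : Arena) (m : Nat) (rest : List (Nat × Nat)), Calls Lay μ Vorbis.WayInv (Vorbis.conv u₀) Vorbis.L.setup_temp_free.entry (Vorbis.Spec.setup_temp_free.spec others frames A m rest)),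
    Vorbis.Spec.StartDecoder.SegC8f Lay μ u₀

end Vorbis.Spec.start_decoder_C8f
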